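-- pv_equiv track=rewrite | github.com/42cosmos/token_classification | metric.py | decompress_labels
-- ===== SOURCE A (Python) =====
-- def decompress_labels(x: list):
--     label_list = [
--         "B-DT", "B-LC", "B-OG", "B-PS", "B-QT", "B-TI", "B-DUR",
--         "O",  # 7
--         "I-DT", "I-LC", "I-OG", "I-PS", "I-QT", "I-TI", "I-DUR",
--     ]
--
--     result = []
--     before_num = 999
--     for idx, num in enumerate(x):
--         if num != -100:
--             result_num = num
--             if num != -100 and num != 7:
--                 if before_num == num:
--                     bumper = 8 # num_labels
--                     result_num += bumper
--             result.append(label_list[result_num])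
--             before_num = num
--     return result
-- ===== SOURCE B (Python) =====
-- from itertools import groupby
--
-- def decompress_labels(x: list):
--     label_list = [
--         "B-DT", "B-LC", "B-OG", "B-PS", "B-QT", "B-TI", "B-DUR",
--         "O",  # 7
--         "I-DT", "I-LC", "I-OG", "I-PS", "I-QT", "I-TI", "I-DUR",
--     ]
--     out = []
--     for k, grp in groupby(v for v in x if v != -100):
--         n = sum(1 for _ in grp)
--         out.append(label_list[k])
--         if n > 1:
--             out.extend([label_list[7] if k == 7 else label_list[k + 8]] * (n - 1))
--     return out
-- ===== Notes on version B (the rewrite author's own statement) =====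
-- stated objective: alternative
-- what changed: Replaces A's element-by-element scan carrying before_num with a run-based pass: filter out -100, group the rest into maximal runs with itertools.groupby, and emit one head label plus n-1 bumped (or 'O') labels per run.
import Mathlib
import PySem

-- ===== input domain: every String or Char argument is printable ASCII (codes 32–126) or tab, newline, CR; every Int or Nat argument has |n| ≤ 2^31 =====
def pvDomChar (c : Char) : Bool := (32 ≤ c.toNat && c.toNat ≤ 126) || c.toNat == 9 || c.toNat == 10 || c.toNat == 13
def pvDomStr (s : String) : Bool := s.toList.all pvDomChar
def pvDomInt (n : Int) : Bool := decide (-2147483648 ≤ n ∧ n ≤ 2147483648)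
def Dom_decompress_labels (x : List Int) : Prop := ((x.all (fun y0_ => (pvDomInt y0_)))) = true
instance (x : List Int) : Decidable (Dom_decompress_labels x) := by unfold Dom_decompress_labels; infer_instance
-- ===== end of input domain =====

-- B replaces A's element-by-element stateful scan by a run-based pass (group the
-- -100-filtered list into maximal runs, emit one head label and n-1 bumped labels per run);
-- objective: alternative decomposition, same cost.

def pvLabelList : List String :=
  ["B-DT", "B-LC", "B-OG", "B-PS", "B-QT", "B-TI", "B-DUR",
   "O",
   "I-DT", "I-LC", "I-OG", "I-PS", "I-QT", "I-TI", "I-DUR"]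

-- ===== PORT A =====
-- state: (result, before_num); label_list[i] via pyGet? (none = IndexError, excluded by Pre_)
def decompress_labels (x : List Int) : List String :=
  (x.foldl
    (fun (st : List String × Int) (num : Int) =>
      if num ≠ -100 then
        let result_num : Int :=
          if num ≠ -100 ∧ num ≠ 7 then
            (if st.2 = num then num + 8 else num)
          else num
        (st.1 ++ [(PySem.List.pyGet? pvLabelList result_num).getD ""], num)
      else st)
    ([], 999)).1

-- ===== PORT B =====
-- itertools.groupby on the filtered list, as (key, run length) pairs
def pvRuns : List Int → List (Int × Nat)
  | [] => []
  | a :: t =>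
      (a, (t.takeWhile (· = a)).length + 1) :: pvRuns (t.dropWhile (· = a))
  termination_by l => l.length
  decreasing_by
    simpa using Nat.lt_succ_of_le (List.length_dropWhile_le _ _)

def decompress_labels_alt (x : List Int) : List String :=
  (pvRuns (x.filter (· ≠ -100))).flatMap
    (fun kn =>
      (PySem.List.pyGet? pvLabelList kn.1).getD "" ::
        List.replicate (kn.2 - 1)
          (if kn.1 = 7 then (PySem.List.pyGet? pvLabelList 7).getD ""
           else (PySem.List.pyGet? pvLabelList (kn.1 + 8)).getD ""))

-- ===== PRECONDITION & SPEC =====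
-- Pre_ excludes exactly the inputs on which Python A raises IndexError: a non-(-100)
-- entry outside [-15, 14], or two adjacent equal non-(-100) entries (ignoring -100 gaps)
-- whose bumped index num+8 exceeds 14 (i.e. num in 8..14, num ≠ 7).
def Pre_decompress_labels (x : List Int) : Prop :=
  (∀ e ∈ x, e ≠ -100 → -15 ≤ e ∧ e ≤ 14) ∧
  List.IsChain (fun a b => (a = b ∧ b ≠ 7) → b ≤ 6) (x.filter (· ≠ -100))
instance (x : List Int) : Decidable (Pre_decompress_labels x) := by
  unfold Pre_decompress_labels; infer_instance

def pvWitness_decompress_labels : List Int := [3, 3, -100, 3, 7, 7, 0, -5, -5, 14]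

def Spec_decompress_labels (x : List Int) (out : List String) : Prop := out = decompress_labels_alt x
instance (x : List Int) (out : List String) : Decidable (Spec_decompress_labels x out) := by unfold Spec_decompress_labels; infer_instance

-- ===== CLAIM (what is proved, stated in full; the proofs are below) =====
def Claim_equal_decompress_labels : Prop := ∀ (x : List Int), Dom_decompress_labels x → Pre_decompress_labels x → Spec_decompress_labels x (decompress_labels x)

-- ===== LEMMAS AND PROOFS =====

-- A's scan on the filtered list, as a recursion carrying before_num
def pvGoA (b : Int) : List Int → List String
  | [] => []
  | n :: t =>
      (PySem.List.pyGet? pvLabelList (if n ≠ 7 ∧ b = n then n + 8 else n)).getD "" ::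
        pvGoA n t

lemma pvFoldA (l : List Int) (acc : List String) (b : Int) :
    (l.foldl
      (fun (st : List String × Int) (num : Int) =>
        if num ≠ -100 then
          let result_num : Int :=
            if num ≠ -100 ∧ num ≠ 7 then
              (if st.2 = num then num + 8 else num)
            else num
          (st.1 ++ [(PySem.List.pyGet? pvLabelList result_num).getD ""], num)
        else st)
      (acc, b)).1 = acc ++ pvGoA b (l.filter (· ≠ -100)) := by
  induction l generalizing acc b with
  | nil => simp [pvGoA]
  | cons n t ih =>
      rw [List.foldl_cons]
      by_cases hn : n = -100
      · subst hn
        rw [if_neg (by simp), ih, List.filter_cons_of_neg (by simp)]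
      · rw [if_pos hn, ih, List.filter_cons_of_pos (by simpa using hn)]
        have hXY : (if n ≠ -100 ∧ n ≠ 7 then (if b = n then n + 8 else n) else n)
            = (if n ≠ 7 ∧ b = n then n + 8 else n) := by
          split_ifs <;> tauto
        simp only [pvGoA, hXY, List.append_assoc, List.singleton_append]

lemma pvRuns_cons (a : Int) (t : List Int) :
    pvRuns (a :: t) = (a, (t.takeWhile (· = a)).length + 1) :: pvRuns (t.dropWhile (· = a)) := by
  rw [pvRuns]

-- the run-based pass equals A's scan, for any carried state b
lemma pvGoA_eq (l : List Int) (a : Int) :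
    pvGoA a l =
      List.replicate ((l.takeWhile (· = a)).length)
          (if a = 7 then (PySem.List.pyGet? pvLabelList 7).getD ""
           else (PySem.List.pyGet? pvLabelList (a + 8)).getD "") ++
        (pvRuns (l.dropWhile (· = a))).flatMap
          (fun kn =>
            (PySem.List.pyGet? pvLabelList kn.1).getD "" ::
              List.replicate (kn.2 - 1)
                (if kn.1 = 7 then (PySem.List.pyGet? pvLabelList 7).getD ""
                 else (PySem.List.pyGet? pvLabelList (kn.1 + 8)).getD "")) := by
  induction l generalizing a with
  | nil => simp [pvGoA, pvRuns]
  | cons c t ih =>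
      by_cases hc : c = a
      · subst hc
        simp only [List.takeWhile_cons, List.dropWhile_cons, decide_true, ite_true,
          if_pos rfl]
        by_cases h7 : c = 7
        · subst h7
          simp [pvGoA, List.replicate_succ, ih 7]
        · simp [pvGoA, h7, List.replicate_succ, ih c]
      · have hct : (decide (c = a)) = false := by simp [hc]
        rw [List.takeWhile_cons, List.dropWhile_cons, hct]
        simp only [Bool.false_eq_true, if_false, List.length_nil, List.replicate_zero,
          List.nil_append]
        rw [pvRuns_cons]
        simp only [List.flatMap_cons]
        have hac : ¬ a = c := fun h => hc h.symm
        have hbump : (if c ≠ 7 ∧ a = c then c + 8 else c) = c := by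
          simp [hac]
        rw [pvGoA, hbump, ih c]
        simp [List.replicate, Nat.add_sub_cancel]

-- ===== VERDICT (by name: the statement is the Claim_ definition above) =====
theorem decompress_labels_spec : Claim_equal_decompress_labels := by
  intro x _ hpre
  unfold Spec_decompress_labels decompress_labels decompress_labels_alt
  rw [pvFoldA x [] 999, List.nil_append, pvGoA_eq]
  have hhead : (x.filter (· ≠ -100)).takeWhile (· = (999 : Int)) = [] := by
    cases hf : x.filter (· ≠ -100) with
    | nil => simp
    | cons h t =>
        have hm : h ∈ x.filter (· ≠ -100) := by rw [hf]; exact List.mem_cons_self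
        have hx : h ∈ x ∧ h ≠ -100 := by
          have := List.mem_filter.mp hm; exact ⟨this.1, by simpa using this.2⟩
        have := (hpre.1 h hx.1 hx.2).2
        simp [List.takeWhile_cons, show ¬(h = (999 : Int)) by omega]
  have hdrop : (x.filter (· ≠ -100)).dropWhile (· = (999 : Int)) = x.filter (· ≠ -100) := by
    cases hf : x.filter (· ≠ -100) with
    | nil => simp
    | cons h t =>
        have hm : h ∈ x.filter (· ≠ -100) := by rw [hf]; exact List.mem_cons_self
        have hx : h ∈ x ∧ h ≠ -100 := by
          have := List.mem_filter.mp hm; exact ⟨this.1, by simpa using this.2⟩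
        have := (hpre.1 h hx.1 hx.2).2
        simp [List.dropWhile_cons, show ¬(h = (999 : Int)) by omega]
  rw [hhead, hdrop]
  simp
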